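-- pv_equiv track=rewrite | github.com/Peterleixx/Agent_Context_OS | skills/persona-vault-static-site/scripts/render_persona_site.py | drop_columns
-- ===== SOURCE A (Python) =====
-- def drop_columns(
--     header: list[str], rows: list[list[str]], blocked_headers: set[str]
-- ) -> tuple[list[str], list[list[str]]]:
--     if not header:
--         return header, rows
--
--     keep_indexes = [index for index, cell in enumerate(header) if cell not in blocked_headers]
--     filtered_header = [header[index] for index in keep_indexes]
--     filtered_rows = [
--         [row[index] for index in keep_indexes if index < len(row)]
--         for row in rows
--     ]
--     return filtered_header, filtered_rows
-- ===== SOURCE B (Python) =====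
-- _END = object()
--
--
-- def drop_columns(header, rows, blocked_headers):
--     if not header:
--         return header, rows
--     # column-major single pass: walk the header once, consuming every row
--     # through its own iterator in lock-step and appending kept cells.
--     out_header = []
--     out_rows = [[] for _ in rows]
--     work = [(iter(row), out.append) for row, out in zip(rows, out_rows)]
--     for h in header:
--         if h in blocked_headers:
--             for it, _append in work:
--                 next(it, _END)
--         else:
--             out_header.append(h)
--             for it, append in work:
--                 cell = next(it, _END)
--                 if cell is not _END:
--                     append(cell)
--     return out_header, out_rows
-- ===== Notes on version B (the rewrite author's own statement) =====
-- stated objective: alternative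
-- what changed: Replaces A's staged passes (precompute keep_indexes, then slice header and each row by stored indices) with a single column-major pass: walk the header once while consuming every row through its own iterator in lock-step, appending kept header names and cells to accumulators; no index table or per-cell indexing remains.
import Mathlib
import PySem

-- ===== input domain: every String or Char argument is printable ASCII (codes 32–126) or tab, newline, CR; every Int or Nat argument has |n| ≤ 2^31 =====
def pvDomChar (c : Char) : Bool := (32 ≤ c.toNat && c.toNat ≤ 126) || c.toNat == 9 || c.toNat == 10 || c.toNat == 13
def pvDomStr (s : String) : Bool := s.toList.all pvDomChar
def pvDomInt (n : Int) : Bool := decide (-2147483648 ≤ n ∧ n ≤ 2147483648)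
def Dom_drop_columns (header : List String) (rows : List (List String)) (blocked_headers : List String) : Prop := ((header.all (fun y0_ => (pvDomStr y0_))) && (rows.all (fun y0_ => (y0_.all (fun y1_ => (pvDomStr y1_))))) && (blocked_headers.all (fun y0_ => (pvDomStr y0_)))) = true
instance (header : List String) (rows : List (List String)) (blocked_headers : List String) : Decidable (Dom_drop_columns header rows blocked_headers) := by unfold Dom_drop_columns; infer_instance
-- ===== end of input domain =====

-- B replaces A's index-table passes by one column-major pass: fold over the header,
-- consuming each row through its own iterator in lock-step (alternative decomposition, same values).

-- ===== PORT A =====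
-- keep_indexes via enumerate; header/row indexing via pyGetD (every index produced by
-- enumerate(header) is in range for header, and the 'index < len(row)' guard keeps row
-- indexing in range, so the default "" is never used — exact on all inputs).
def drop_columns (header : List String) (rows : List (List String)) (blocked_headers : List String) : List String × List (List String) :=
  if header = [] then (header, rows)
  else
    let keep_indexes := ((PySem.List.enumerate header 0).filter (fun p => !(blocked_headers.contains p.2))).map (·.1)
    let filtered_header := keep_indexes.map (fun i => PySem.List.pyGetD header i "")
    let filtered_rows := rows.map (fun row =>
      (keep_indexes.filter (fun i => decide (i < (row.length : Int)))).map (fun i => PySem.List.pyGetD row i ""))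
    (filtered_header, filtered_rows)

-- ===== PORT B =====
-- column-major single pass: fold over the header; each row's iterator is the remaining
-- list (next(it, _END) = head-or-exhausted); outputs grow by append exactly as in Source B,
-- with Source B's blocked/kept branch deciding which inner pass runs.
def drop_columns_alt (header : List String) (rows : List (List String)) (blocked_headers : List String) : List String × List (List String) :=
  if header = [] then (header, rows)
  else
    let st := header.foldl (fun st h =>
      if blocked_headers.contains h then
        (st.1, st.2.map (fun p =>
          match p.1 with
          | [] => p                                  -- iterator exhausted: next returned _END
          | _ :: rest => (rest, p.2)))
      else
        (st.1 ++ [h], st.2.map (fun p =>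
          match p.1 with
          | [] => p
          | c :: rest => (rest, p.2 ++ [c]))))
      (([] : List String), rows.map (fun row => (row, ([] : List String))))
    (st.1, st.2.map (·.2))

-- ===== PRECONDITION & SPEC =====
def Spec_drop_columns (header : List String) (rows : List (List String)) (blocked_headers : List String) (out : List String × List (List String)) : Prop := out = drop_columns_alt header rows blocked_headers
instance (header : List String) (rows : List (List String)) (blocked_headers : List String) (out : List String × List (List String)) : Decidable (Spec_drop_columns header rows blocked_headers out) := by unfold Spec_drop_columns; infer_instance

-- ===== CLAIM (what is proved, stated in full; the proofs are below) =====
def Claim_equal_drop_columns : Prop := ∀ (header : List String) (rows : List (List String)) (blocked_headers : List String), Dom_drop_columns header rows blocked_headers → Spec_drop_columns header rows blocked_headers (drop_columns header rows blocked_headers)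

-- ===== LEMMAS AND PROOFS =====

-- A-side characterisation: the index-table passes compute the zip/filter of header with each row.
lemma keep_zip (blocked : List String) : ∀ (hdr : List String) (done row : List String),
    (((((PySem.List.enumerate hdr (done.length : Int)).filter
          (fun p => !(blocked.contains p.2))).map (·.1)).filter
        (fun i => decide (i < ((done ++ row).length : Int)))).map
      (fun i => PySem.List.pyGetD (done ++ row) i ""))
    = ((hdr.zip row).filter (fun p => !(blocked.contains p.1))).map (·.2) := by
  intro hdr
  induction hdr with
  | nil => intro done row; simp [PySem.List.enumerate]
  | cons h hs ih =>
    intro done row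
    cases row with
    | nil =>
      simp only [List.zip_nil_right, List.filter_nil, List.map_nil, List.append_nil]
      rw [List.map_eq_nil_iff, List.filter_eq_nil_iff]
      intro i hi
      simp only [List.mem_map, List.mem_filter] at hi
      obtain ⟨p, ⟨hp, _⟩, rfl⟩ := hi
      rw [PySem.List.mem_enumerate_iff] at hp
      obtain ⟨k, hk, rfl⟩ := hp
      simp
    | cons r rs =>
      have ih' := ih (done ++ [r]) rs
      rw [show (done ++ [r]) ++ rs = done ++ r :: rs by simp] at ih'
      rw [show (((done ++ [r]).length : Nat) : Int) = ((done.length : Nat) : Int) + 1 by simp] at ih'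
      by_cases hb : h ∈ blocked
      · simpa [PySem.List.enumerate_cons, hb] using ih'
      · have hlt : ((done.length : Nat) : Int) < (((done ++ r :: rs).length : Nat) : Int) := by
          simp
        have hget : PySem.List.pyGetD (done ++ r :: rs) ((done.length : Nat) : Int) "" = r := by
          simp [PySem.List.pyGetD]
        simpa [PySem.List.enumerate_cons, hb, List.filter_cons, hlt, hget] using ih'

-- every index produced by enumerate(header) is < len(header), so the row guard keeps all of them
lemma keep_filter_id (blocked hdr : List String) :
    ((((PySem.List.enumerate hdr (0 : Int)).filter (fun p => !(blocked.contains p.2))).map (·.1)).filter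
        (fun i => decide (i < ((hdr.length : Nat) : Int))))
    = (((PySem.List.enumerate hdr (0 : Int)).filter (fun p => !(blocked.contains p.2))).map (·.1)) := by
  rw [List.filter_eq_self]
  intro i hi
  simp only [List.mem_map, List.mem_filter] at hi
  obtain ⟨p, ⟨hp, _⟩, rfl⟩ := hi
  rw [PySem.List.mem_enumerate_iff] at hp
  obtain ⟨k, hk, rfl⟩ := hp
  simp; omega

lemma zip_self_filter (blocked : List String) : ∀ (hdr : List String),
    ((hdr.zip hdr).filter (fun p => !(blocked.contains p.1))).map (·.2)
    = hdr.filter (fun h => !(blocked.contains h)) := by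
  intro hdr
  induction hdr with
  | nil => simp
  | cons h hs ih =>
    by_cases hb : h ∈ blocked <;> simpa [List.filter_cons, hb] using ih

lemma keep_zip_zero (blocked hdr row : List String) :
    (((((PySem.List.enumerate hdr (0 : Int)).filter
          (fun p => !(blocked.contains p.2))).map (·.1)).filter
        (fun i => decide (i < ((row.length : Nat) : Int)))).map
      (fun i => PySem.List.pyGetD row i ""))
    = ((hdr.zip row).filter (fun p => !(blocked.contains p.1))).map (·.2) := by
  have := keep_zip blocked hdr [] row
  simpa using this

-- B-side characterisation: the column-major fold computes the zip/filter of header with each row.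
lemma fold_spec (bl : List String) : ∀ (hdr : List String) (accH : List String)
    (prs : List (List String × List String)),
    hdr.foldl (fun st h =>
      if bl.contains h then
        (st.1, st.2.map (fun p =>
          match p.1 with
          | [] => p
          | _ :: rest => (rest, p.2)))
      else
        (st.1 ++ [h], st.2.map (fun p =>
          match p.1 with
          | [] => p
          | c :: rest => (rest, p.2 ++ [c])))) (accH, prs)
    = (accH ++ hdr.filter (fun h => !(bl.contains h)),
       prs.map (fun p => (p.1.drop hdr.length,
         p.2 ++ ((hdr.zip p.1).filter (fun r => !(bl.contains r.1))).map (·.2)))) := by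
  intro hdr
  induction hdr with
  | nil => intro accH prs; simp
  | cons h rest ih =>
    intro accH prs
    by_cases hb : bl.contains h = true <;>
      · simp only [List.foldl_cons, hb, if_pos, if_neg, Bool.false_eq_true,
          not_false_eq_true, ih, List.map_map, List.filter_cons, Bool.not_true, Bool.not_false]
        refine Prod.ext (by simp) ?_
        show prs.map _ = prs.map _
        refine List.map_congr_left (fun p _ => ?_)
        obtain ⟨r, acc⟩ := p
        rw [List.contains_eq_mem] at hb
        cases r <;> simp [hb]

-- ===== VERDICT (by name: the statement is the Claim_ definition above) =====
theorem drop_columns_spec : Claim_equal_drop_columns := by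
  intro header rows blocked_headers _
  unfold Spec_drop_columns drop_columns drop_columns_alt
  by_cases hh : header = []
  · simp [hh]
  · simp only [if_neg hh]
    rw [fold_spec]
    simp only [List.map_map]
    refine Prod.ext ?_ ?_
    · rw [← List.map_map, ← keep_filter_id blocked_headers header, keep_zip_zero, zip_self_filter]
      simp
    · refine List.map_congr_left (fun row _ => ?_)
      simpa using keep_zip_zero blocked_headers header row
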